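-- pv_equiv track=rewrite | github.com/mar-l01/AdventOfCode_2020 | day_16/puzzles.py | check_invalid_nearby_tickets
-- ===== SOURCE A (Python) =====
-- def check_invalid_nearby_tickets(ticket_rules, nearby_tickets):
--     """
--     Iterate over all given tickets in 'nearby_tickets' and remember all invalid ticket values.
--     Return them as a list. Return an additional list which contains all remaining valid tickets.
--     Tickets which contain an invalid number are thus discarded completely.
--     """
--     invalid_ticket_values = []
--     remaining_valid_tickets = []
--
--     for nearby_ticket in nearby_tickets:
--         invalid_values_of_ticket = get_invalid_ticket_values(ticket_rules, nearby_ticket)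
--
--         # assume that an empty list refers to a valid ticket
--         if invalid_values_of_ticket == []:
--             remaining_valid_tickets.append(nearby_ticket)
--         else:
--             invalid_ticket_values += invalid_values_of_ticket
--
--     return invalid_ticket_values, remaining_valid_tickets
--
-- def get_invalid_ticket_values(ticket_rules, nearby_ticket):
--     """
--     Use given 'nearby_ticket' and check if each value int this list matches at least one rule of given
--     'ticket_rules'. If a value does not match the given rule, add them to a list. In the end return
--     this list.
--     """
--     invalid_values = []
--
--     # go through each value of given ticket
--     for value in nearby_ticket:
--         # check if value matches at least 1 rule (which one does not matter!)
--         value_does_not_match_rule = True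
--         for intervalls in ticket_rules.values():
--             if value_matches_rule(intervalls, value):
--                 value_does_not_match_rule = False
--
--         # value did not match to any rule --> add it to non-matching values list
--         if value_does_not_match_rule:
--             invalid_values.append(value)
--
--     return invalid_values
--
-- def value_matches_rule(intervalls, value):
--     """ Check if given 'value' is in intervall given as list of two intervalls in 'ticket_rule' """
--     interval_1, interval_2 = intervalls
--     if interval_1[0] <= value <= interval_1[1] or\
--         interval_2[0] <= value <= interval_2[1]:
--         return True
--
--     return False
-- ===== SOURCE B (Python) =====
-- def check_invalid_nearby_tickets(ticket_rules, nearby_tickets):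
--     """
--     Same result as the naive version, but instead of testing every value against
--     every rule, flatten all rule intervals once (lazily, on the first value that
--     needs checking), sort them by lower bound, merge them into a disjoint ordered
--     list, and binary-search each ticket value in it.
--     """
--     merged = None  # merged disjoint interval list, built on first use
--
--     def valid(v):
--         nonlocal merged
--         if merged is None:
--             ivs = sorted(((interval[0], interval[1])
--                           for intervalls in ticket_rules.values()
--                           for interval in intervalls),
--                          key=lambda iv: iv[0])
--             merged = []
--             for iv in ivs:
--                 if merged and iv[0] <= merged[-1][1]:
--                     merged[-1] = (merged[-1][0], max(merged[-1][1], iv[1]))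
--                 else:
--                     merged.append(iv)
--         # rightmost interval whose lower bound is <= v, by binary search
--         a, b = 0, len(merged)
--         while a < b:
--             m = (a + b) // 2
--             if merged[m][0] <= v:
--                 a = m + 1
--             else:
--                 b = m
--         return a > 0 and v <= merged[a - 1][1]
--
--     invalid_ticket_values = []
--     remaining_valid_tickets = []
--     for ticket in nearby_tickets:
--         bad = [v for v in ticket if not valid(v)]
--         if bad == []:
--             remaining_valid_tickets.append(ticket)
--         else:
--             invalid_ticket_values += bad
--     return invalid_ticket_values, remaining_valid_tickets
-- ===== Notes on version B (the rewrite author's own statement) =====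
-- stated objective: faster
-- what changed: Instead of testing every ticket value against every rule's two intervals, B flattens all rule intervals once (on the first value checked), sorts them by lower bound, merges them into a disjoint ordered interval list, and decides each value's validity by one binary search in that list.
-- outside the precondition, e.g. on check_invalid_nearby_tickets({'a': [[5], [0, 9]]}, [[3]]): A returns ([], [[3]]), B raises IndexError
import Mathlib
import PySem

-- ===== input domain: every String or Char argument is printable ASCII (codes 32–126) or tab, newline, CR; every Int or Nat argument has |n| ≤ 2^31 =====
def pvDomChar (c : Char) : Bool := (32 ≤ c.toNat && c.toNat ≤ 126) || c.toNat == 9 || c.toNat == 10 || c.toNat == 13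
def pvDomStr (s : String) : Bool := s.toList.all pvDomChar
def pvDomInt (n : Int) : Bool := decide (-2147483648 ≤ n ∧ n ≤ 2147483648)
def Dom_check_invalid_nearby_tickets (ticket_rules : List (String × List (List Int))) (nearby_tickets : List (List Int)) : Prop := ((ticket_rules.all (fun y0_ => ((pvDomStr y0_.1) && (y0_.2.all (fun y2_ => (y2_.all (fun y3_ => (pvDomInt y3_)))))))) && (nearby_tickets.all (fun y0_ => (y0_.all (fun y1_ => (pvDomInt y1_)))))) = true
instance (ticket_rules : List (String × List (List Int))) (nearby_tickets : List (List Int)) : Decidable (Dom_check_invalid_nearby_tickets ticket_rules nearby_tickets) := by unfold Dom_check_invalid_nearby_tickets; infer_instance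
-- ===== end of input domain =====

-- B replaces the per-value scan over every rule by a sorted merged disjoint interval list
-- queried by binary search (measured faster on large inputs in a timing run).

-- ===== PORT A =====
def value_matches_rule (intervalls : List (List Int)) (value : Int) : Bool :=
  -- 'interval_1, interval_2 = intervalls' raises ValueError unless exactly two intervals;
  -- the fallback branch is excluded by Pre_
  match intervalls with
  | [interval_1, interval_2] =>
      (decide (PySem.List.pyGetD interval_1 0 0 ≤ value) && decide (value ≤ PySem.List.pyGetD interval_1 1 0))
      || (decide (PySem.List.pyGetD interval_2 0 0 ≤ value) && decide (value ≤ PySem.List.pyGetD interval_2 1 0))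
  | _ => false

def get_invalid_ticket_values (ticket_rules : PySem.Dict String (List (List Int))) (nearby_ticket : List Int) : List Int :=
  nearby_ticket.foldl (fun invalid_values value =>
    let value_does_not_match_rule :=
      (PySem.Dict.values ticket_rules).foldl
        (fun f intervalls => if value_matches_rule intervalls value then false else f) true
    if value_does_not_match_rule then invalid_values ++ [value] else invalid_values) []

def check_invalid_nearby_tickets (ticket_rules : List (String × List (List Int))) (nearby_tickets : List (List Int)) : List Int × List (List Int) :=
  let d := PySem.Dict.ofList ticket_rules
  nearby_tickets.foldl (fun st nearby_ticket =>
    let invalid_values_of_ticket := get_invalid_ticket_values d nearby_ticket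
    if invalid_values_of_ticket = [] then (st.1, st.2 ++ [nearby_ticket])
    else (st.1 ++ invalid_values_of_ticket, st.2)) ([], [])

-- ===== PORT B =====
-- (interval[0], interval[1]); Python raises on a short interval, the port's defaults are
-- only reached outside Pre_ or on inputs where the Python never builds the list (all
-- tickets empty), where the built list is never consulted
def pvIv (interval : List Int) : Int × Int :=
  (PySem.List.pyGetD interval 0 0, PySem.List.pyGetD interval 1 0)

-- the flattening generator over all rules' intervals
def pvIntervals (vals : List (List (List Int))) : List (Int × Int) :=
  vals.foldl (fun ivs intervalls =>
    intervalls.foldl (fun ivs interval => ivs ++ [pvIv interval]) ivs) []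

-- one iteration of the merging loop (merged[-1] update / append)
def pvMergeStep (merged : List (Int × Int)) (iv : Int × Int) : List (Int × Int) :=
  match merged.getLast? with
  | some last =>
      if iv.1 ≤ last.2 then merged.dropLast ++ [(last.1, max last.2 iv.2)]
      else merged ++ [iv]
  | none => [iv]

def pvMerge (ivs : List (Int × Int)) : List (Int × Int) :=
  ivs.foldl pvMergeStep []

-- the 'while a < b' binary-search loop of valid(); the fuel argument only makes the loop a
-- structural recursion: each iteration shrinks b - a, so fuel = initial b - a always suffices
def pvBsearch (fuel : Nat) (merged : List (Int × Int)) (v : Int) (a b : Nat) : Nat :=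
  match fuel with
  | 0 => a
  | fuel + 1 =>
    if a < b then
      let m := (a + b) / 2
      if (merged.getD m (0, 0)).1 ≤ v then pvBsearch fuel merged v (m + 1) b
      else pvBsearch fuel merged v a m
    else a

def pvValid (merged : List (Int × Int)) (v : Int) : Bool :=
  let a := pvBsearch merged.length merged v 0 merged.length
  decide (0 < a) && decide (v ≤ (merged.getD (a - 1) (0, 0)).2)

-- Source B builds 'merged' lazily on the first call of valid(); a pure eager build computes
-- the same value (when no value is ever checked, the built list is never consulted)
def check_invalid_nearby_tickets_alt (ticket_rules : List (String × List (List Int))) (nearby_tickets : List (List Int)) : List Int × List (List Int) :=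
  let d := PySem.Dict.ofList ticket_rules
  let ivs := PySem.List.sorted (pvIntervals (PySem.Dict.values d)) (fun iv => iv.1)
  let merged := pvMerge ivs
  nearby_tickets.foldl (fun st ticket =>
    let bad := ticket.filter (fun v => !pvValid merged v)
    if bad = [] then (st.1, st.2 ++ [ticket]) else (st.1 ++ bad, st.2)) ([], [])

-- ===== PRECONDITION & SPEC =====
-- When some ticket value exists, malformed rules make one of the programs raise (A a
-- ValueError on a rule without exactly two intervals, A an IndexError on a short interval
-- it probes past the short-circuited '<=', B an IndexError on any short interval while
-- building its index); Pre_ keeps inputs with only empty tickets (both return normally,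
-- B never builds) and otherwise demands well-formed rules — it thereby also excludes the
-- inputs where A returns only because '<=' short-circuits past a missing upper bound
-- while B, which reads both bounds, raises (see the cite in claim.json).
def Pre_check_invalid_nearby_tickets (ticket_rules : List (String × List (List Int))) (nearby_tickets : List (List Int)) : Prop :=
  (∀ t ∈ nearby_tickets, t = []) ∨
    ((∀ l ∈ (PySem.Dict.ofList ticket_rules).values, l.length = 2) ∧
     (∀ l ∈ (PySem.Dict.ofList ticket_rules).values, ∀ iv ∈ l, 2 ≤ iv.length))

instance (ticket_rules : List (String × List (List Int))) (nearby_tickets : List (List Int)) : Decidable (Pre_check_invalid_nearby_tickets ticket_rules nearby_tickets) := by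
  unfold Pre_check_invalid_nearby_tickets; infer_instance

def pvWitness_check_invalid_nearby_tickets : (List (String × List (List Int))) × List (List Int) :=
  ([("a", [[0, 1], [3, 4]])], [[0], [2]])

def Spec_check_invalid_nearby_tickets (ticket_rules : List (String × List (List Int))) (nearby_tickets : List (List Int)) (out : List Int × List (List Int)) : Prop := out = check_invalid_nearby_tickets_alt ticket_rules nearby_tickets
instance (ticket_rules : List (String × List (List Int))) (nearby_tickets : List (List Int)) (out : List Int × List (List Int)) : Decidable (Spec_check_invalid_nearby_tickets ticket_rules nearby_tickets out) := by unfold Spec_check_invalid_nearby_tickets; infer_instance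

-- ===== CLAIM (what is proved, stated in full; the proofs are below) =====
def Claim_equal_check_invalid_nearby_tickets : Prop := ∀ (ticket_rules : List (String × List (List Int))) (nearby_tickets : List (List Int)), Dom_check_invalid_nearby_tickets ticket_rules nearby_tickets → Pre_check_invalid_nearby_tickets ticket_rules nearby_tickets → Spec_check_invalid_nearby_tickets ticket_rules nearby_tickets (check_invalid_nearby_tickets ticket_rules nearby_tickets)

-- ===== LEMMAS AND PROOFS =====

-- membership in the original intervals (as a Bool, "value is covered")
def pvCov (L : List (Int × Int)) (v : Int) : Bool :=
  L.any (fun p => decide (p.1 ≤ v) && decide (v ≤ p.2))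

-- A's flag loop computes "no rule matched"
theorem pv_flag_foldl (vals : List (List (List Int))) (v : Int) (init : Bool) :
    vals.foldl (fun f intervalls => if value_matches_rule intervalls v then false else f) init
      = (init && !(vals.any (fun ivls => value_matches_rule ivls v))) := by
  induction vals generalizing init with
  | nil => simp
  | cons ivls vals ih =>
    simp only [List.foldl_cons, List.any_cons]
    rw [ih]
    cases h : value_matches_rule ivls v <;> simp

-- flattening loop = flatMap
theorem pv_fold_append_map (l : List (List Int)) :
    ∀ (acc : List (Int × Int)),
      l.foldl (fun ivs interval => ivs ++ [pvIv interval]) acc = acc ++ l.map pvIv := by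
  induction l with
  | nil => simp
  | cons x l ih => intro acc; simp [ih]

theorem pv_intervals_fold (vals : List (List (List Int))) :
    ∀ (acc : List (Int × Int)),
      vals.foldl (fun ivs intervalls =>
          intervalls.foldl (fun ivs interval => ivs ++ [pvIv interval]) ivs) acc
        = acc ++ vals.flatMap (fun ivls => ivls.map pvIv) := by
  induction vals with
  | nil => simp
  | cons ivls vals ih =>
    intro acc
    rw [List.foldl_cons, pv_fold_append_map, ih, List.flatMap_cons, List.append_assoc]

theorem pv_intervals_eq (vals : List (List (List Int))) :
    pvIntervals vals = vals.flatMap (fun ivls => ivls.map pvIv) := by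
  unfold pvIntervals
  rw [pv_intervals_fold]
  simp

-- a two-interval rule matches iff one of its two flattened intervals covers the value
theorem pv_rule_cov (ivls : List (List Int)) (v : Int) (h : ivls.length = 2) :
    value_matches_rule ivls v = pvCov (ivls.map pvIv) v := by
  rcases List.length_eq_two.mp h with ⟨i1, i2, rfl⟩
  simp [value_matches_rule, pvCov, pvIv]

-- coverage is invariant under any permutation (used for the sort)
theorem pv_cov_perm {L M : List (Int × Int)} (h : L.Perm M) (v : Int) : pvCov L v = pvCov M v := by
  unfold pvCov
  exact h.any_eq

-- the merging loop: keeps coverage, produces an ordered disjoint list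
def pvOrd (p q : Int × Int) : Prop := p.1 ≤ q.1 ∧ p.2 < q.1

theorem pv_merge_fold (l : List (Int × Int)) :
    ∀ (acc : List (Int × Int)),
    (acc ++ l).Pairwise (fun p q => p.1 ≤ q.1) →
    acc.Pairwise pvOrd →
    (l.foldl pvMergeStep acc).Pairwise pvOrd ∧
      ∀ v, pvCov (l.foldl pvMergeStep acc) v = (pvCov acc v || pvCov l v) := by
  induction l with
  | nil =>
    intro acc _ ha
    exact ⟨ha, fun v => by simp [pvCov]⟩
  | cons iv l ih =>
    intro acc hs ha
    rcases List.pairwise_append.mp hs with ⟨hsacc, hsl, hscross⟩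
    have hf : ∀ p ∈ acc, p.1 ≤ iv.1 := fun p hp => hscross p hp iv (List.mem_cons_self)
    have hsl' : l.Pairwise (fun p q => p.1 ≤ q.1) := hsl.of_cons
    have hivl : ∀ q ∈ l, iv.1 ≤ q.1 := (List.pairwise_cons.mp hsl).1
    -- analyze one step of the merging loop
    obtain ⟨hs', ha', hcov⟩ :
        ((pvMergeStep acc iv ++ l).Pairwise (fun p q => p.1 ≤ q.1)) ∧
          (pvMergeStep acc iv).Pairwise pvOrd ∧
          ∀ v, pvCov (pvMergeStep acc iv) v
              = (pvCov acc v || (decide (iv.1 ≤ v) && decide (v ≤ iv.2))) := by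
      cases hlast : acc.getLast? with
      | none =>
        have hacc : acc = [] := List.getLast?_eq_none_iff.mp hlast
        subst hacc
        refine ⟨?_, ?_, ?_⟩
        · simpa [pvMergeStep] using hs
        · simp [pvMergeStep]
        · intro v; simp [pvMergeStep, pvCov]
      | some last =>
        obtain ⟨init, rfl⟩ : ∃ init, acc = init ++ [last] := by
          rcases List.getLast?_eq_some_iff.mp hlast with ⟨l', rfl⟩; exact ⟨l', rfl⟩
        rcases List.pairwise_append.mp ha with ⟨hainit, -, hacross⟩
        have hlast1 : last.1 ≤ iv.1 := hf last (by simp)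
        by_cases hle : iv.1 ≤ last.2
        · have hstep : pvMergeStep (init ++ [last]) iv
              = init ++ [(last.1, max last.2 iv.2)] := by
            simp [pvMergeStep, hlast, hle]
          rw [hstep]
          refine ⟨?_, ?_, ?_⟩
          · refine List.pairwise_append.mpr ⟨?_, hsl', ?_⟩
            · refine List.pairwise_append.mpr ⟨(List.pairwise_append.mp hsacc).1, by simp, ?_⟩
              intro p hp q hq
              simp only [List.mem_singleton] at hq; subst hq
              exact (List.pairwise_append.mp hsacc).2.2 p hp last (by simp)
            · intro p hp q hq
              rcases List.mem_append.mp hp with hp' | hp'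
              · exact hscross p (List.mem_append.mpr (Or.inl hp')) q (List.mem_cons_of_mem _ hq)
              · simp only [List.mem_singleton] at hp'; subst hp'
                exact hscross last (by simp) q (List.mem_cons_of_mem _ hq)
          · refine List.pairwise_append.mpr ⟨hainit, by simp, ?_⟩
            intro p hp q hq
            simp only [List.mem_singleton] at hq; subst hq
            exact ⟨(hacross p hp last (by simp)).1, (hacross p hp last (by simp)).2⟩
          · intro v
            unfold pvCov
            rw [List.any_append, List.any_append]
            simp only [List.any_cons, List.any_nil]
            cases hci : (init.any fun p => decide (p.1 ≤ v) && decide (v ≤ p.2)) <;>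
              simp only [Bool.false_or, Bool.true_or, Bool.or_false]
            all_goals first
              | rfl
              | (rw [Bool.eq_iff_iff]
                 simp only [Bool.or_eq_true, Bool.and_eq_true, decide_eq_true_eq]
                 omega)
        · have hstep : pvMergeStep (init ++ [last]) iv = (init ++ [last]) ++ [iv] := by
            simp [pvMergeStep, hlast, hle]
          rw [hstep]
          refine ⟨?_, ?_, ?_⟩
          · refine List.pairwise_append.mpr ⟨List.pairwise_append.mpr ⟨hsacc, by simp, ?_⟩, hsl', ?_⟩
            · intro p hp q hq
              simp only [List.mem_singleton] at hq; subst hq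
              exact hf p hp
            · intro p hp q hq
              rcases List.mem_append.mp hp with hp' | hp'
              · exact hscross p hp' q (List.mem_cons_of_mem _ hq)
              · simp only [List.mem_singleton] at hp'; subst hp'
                exact hivl q hq
          · refine List.pairwise_append.mpr ⟨ha, by simp, ?_⟩
            intro p hp q hq
            simp only [List.mem_singleton] at hq; subst hq
            refine ⟨hf p hp, ?_⟩
            rcases List.mem_append.mp hp with hp' | hp'
            · exact lt_of_lt_of_le (hacross p hp' last (by simp)).2 hlast1
            · simp only [List.mem_singleton] at hp'; subst hp'
              omega
          · intro v
            unfold pvCov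
            rw [List.any_append]
            simp
    rw [List.foldl_cons]
    obtain ⟨P, C⟩ := ih (pvMergeStep acc iv) hs' ha'
    refine ⟨P, fun v => ?_⟩
    rw [C, hcov]
    unfold pvCov
    simp only [List.any_cons]
    cases (acc.any fun p => decide (p.1 ≤ v) && decide (v ≤ p.2)) <;> simp

-- binary search finds the frontier of lower bounds ≤ v
theorem pv_bsearch_spec (merged : List (Int × Int)) (v : Int)
    (hs : (merged.map Prod.fst).Pairwise (· ≤ ·)) :
    ∀ (n a b : Nat), b - a ≤ n → a ≤ b → b ≤ merged.length →
    (∀ i (hi : i < merged.length), i < a → merged[i].1 ≤ v) →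
    (∀ i (hi : i < merged.length), b ≤ i → v < merged[i].1) →
    pvBsearch n merged v a b ≤ b ∧
      (∀ i (hi : i < merged.length), i < pvBsearch n merged v a b → merged[i].1 ≤ v) ∧
      (∀ i (hi : i < merged.length), pvBsearch n merged v a b ≤ i → v < merged[i].1) := by
  have hmono : ∀ i j (_hi : i < merged.length) (_hj : j < merged.length), i < j →
      merged[i].1 ≤ merged[j].1 := by
    intro i j hi hj hij
    have := List.pairwise_iff_getElem.mp hs i j (by simpa using hi) (by simpa using hj) hij
    simpa using this
  intro n
  induction n with
  | zero =>
    intro a b hn hab _hb hlow hhigh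
    simp only [pvBsearch]
    have hba : a = b := by omega
    subst hba
    exact ⟨le_rfl, hlow, hhigh⟩
  | succ n ih =>
    intro a b hn hab hb hlow hhigh
    by_cases hlt : a < b
    · have hm1 : (a + b) / 2 < b := by omega
      have hm0 : a ≤ (a + b) / 2 := by omega
      have hmlen : (a + b) / 2 < merged.length := by omega
      have hgetd : merged.getD ((a + b) / 2) (0, 0) = merged[(a + b) / 2] :=
        List.getD_eq_getElem _ _ hmlen
      simp only [pvBsearch, if_pos hlt, hgetd]
      by_cases hc : merged[(a + b) / 2].1 ≤ v
      · rw [if_pos hc]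
        refine ih ((a + b) / 2 + 1) b (by omega) (by omega) hb ?_ hhigh
        intro i hi hia
        rcases Nat.lt_succ_iff_lt_or_eq.mp hia with h' | h'
        · exact le_trans (hmono i ((a + b) / 2) hi hmlen h') hc
        · subst h'; exact hc
      · rw [if_neg hc]
        push Not at hc
        have hup : ∀ i (hi : i < merged.length), (a + b) / 2 ≤ i → v < merged[i].1 := by
          intro i hi him
          rcases Nat.eq_or_lt_of_le him with h' | h'
          · subst h'; exact hc
          · exact lt_of_lt_of_le hc (hmono ((a + b) / 2) i hmlen hi h')
        obtain ⟨h1, h2, h3⟩ := ih a ((a + b) / 2) (by omega) (by omega) (by omega) hlow hup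
        exact ⟨by omega, h2, h3⟩
    · simp only [pvBsearch, if_neg hlt]
      have hba : a = b := by omega
      subst hba
      exact ⟨le_rfl, hlow, hhigh⟩

-- on an ordered disjoint list, the binary-search test decides coverage
theorem pv_valid_eq_cov (merged : List (Int × Int)) (v : Int) (h : merged.Pairwise pvOrd) :
    pvValid merged v = pvCov merged v := by
  have hs : (merged.map Prod.fst).Pairwise (· ≤ ·) :=
    List.pairwise_map.mpr (h.imp fun hpq => hpq.1)
  have hOrd : ∀ i j (_hi : i < merged.length) (_hj : j < merged.length), i < j →
      merged[i].2 < merged[j].1 := by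
    intro i j hi hj hij
    exact (List.pairwise_iff_getElem.mp h i j hi hj hij).2
  obtain ⟨hrb, hlow, hhigh⟩ :=
    pv_bsearch_spec merged v hs merged.length 0 merged.length (by omega) (by omega) le_rfl
      (by omega) (by intro i hi hbi; omega)
  set r := pvBsearch merged.length merged v 0 merged.length with hr
  unfold pvValid
  rw [← hr, Bool.eq_iff_iff]
  simp only [pvCov, List.any_eq_true, Bool.and_eq_true, decide_eq_true_eq]
  constructor
  · rintro ⟨h0, hv2⟩
    have hrlen : r - 1 < merged.length := by omega
    rw [List.getD_eq_getElem _ _ hrlen] at hv2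
    exact ⟨merged[r - 1], List.getElem_mem _, hlow (r - 1) hrlen (by omega), hv2⟩
  · rintro ⟨p, hp, h1, h2⟩
    obtain ⟨i, hi, rfl⟩ := List.mem_iff_getElem.mp hp
    have hir : i < r := by
      by_contra hcon
      exact absurd h1 (not_le.mpr (hhigh i hi (by omega)))
    have h0 : 0 < r := by omega
    have hrlen : r - 1 < merged.length := by omega
    refine ⟨h0, ?_⟩
    rw [List.getD_eq_getElem _ _ hrlen]
    rcases Nat.lt_or_ge i (r - 1) with h' | h'
    · have := hOrd i (r - 1) hi hrlen h'
      have := hlow (r - 1) hrlen (by omega)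
      omega
    · have hieq : i = r - 1 := by omega
      subst hieq
      exact h2

-- coverage of the flattened intervals = "some rule matches"
theorem pv_cov_flat (vals : List (List (List Int))) (v : Int)
    (h2 : ∀ l ∈ vals, l.length = 2) :
    pvCov (vals.flatMap (fun ivls => ivls.map pvIv)) v
      = vals.any (fun ivls => value_matches_rule ivls v) := by
  induction vals with
  | nil => simp [pvCov]
  | cons l vals ih =>
    have hcons : pvCov ((l.map pvIv) ++ vals.flatMap (fun ivls => ivls.map pvIv)) v
        = (pvCov (l.map pvIv) v || pvCov (vals.flatMap (fun ivls => ivls.map pvIv)) v) := by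
      unfold pvCov; rw [List.any_append]
    rw [List.flatMap_cons, hcons, List.any_cons,
      ih (fun l' hl' => h2 l' (List.mem_cons_of_mem _ hl')),
      ← pv_rule_cov l v (h2 l List.mem_cons_self)]

-- a fold over empty tickets only appends them to the valid list (A and B alike)
theorem pv_fold_empty (step : List Int × List (List Int) → List Int → List Int × List (List Int))
    (hstep : ∀ st, step st [] = (st.1, st.2 ++ [[]])) :
    ∀ (ts : List (List Int)), (∀ t ∈ ts, t = []) → ∀ st,
      ts.foldl step st = (st.1, st.2 ++ ts) := by
  intro ts
  induction ts with
  | nil => intro _ st; simp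
  | cons t ts ih =>
    intro h st
    have ht : t = [] := h t List.mem_cons_self
    subst ht
    rw [List.foldl_cons, hstep st, ih (fun t' ht' => h t' (List.mem_cons_of_mem _ ht'))]
    simp

-- the per-value loop of A collects exactly the values failing the test
theorem pv_foldl_filter (p : Int → Bool) (t : List Int) :
    ∀ init, t.foldl (fun acc v => if p v then acc ++ [v] else acc) init = init ++ t.filter p := by
  induction t with
  | nil => simp
  | cons x t ih =>
    intro init
    cases h : p x <;> simp [h, ih]

-- per value: B's validity test agrees with "some rule matches"
theorem pv_valid_eq_match (vals : List (List (List Int))) (v : Int)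
    (h2 : ∀ l ∈ vals, l.length = 2) :
    pvValid (pvMerge (PySem.List.sorted (pvIntervals vals) (fun iv => iv.1))) v
      = vals.any (fun ivls => value_matches_rule ivls v) := by
  have hsort : (PySem.List.sorted (pvIntervals vals) (fun iv => iv.1)).Pairwise
      (fun p q : Int × Int => p.1 ≤ q.1) :=
    List.pairwise_map.mp (PySem.List.sorted_map_key_pairwise _ _)
  obtain ⟨hP, hC⟩ := pv_merge_fold (PySem.List.sorted (pvIntervals vals) (fun iv => iv.1)) []
    (by simpa using hsort) (by simp)
  unfold pvMerge
  rw [pv_valid_eq_cov _ v hP, hC v,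
    pv_cov_perm (PySem.List.sorted_perm (pvIntervals vals) (fun iv : Int × Int => iv.1) false) v,
    pv_intervals_eq, pv_cov_flat vals v h2]
  simp [pvCov]

-- ===== VERDICT (by name: the statement is the Claim_ definition above) =====
theorem check_invalid_nearby_tickets_spec : Claim_equal_check_invalid_nearby_tickets := by
  intro ticket_rules nearby_tickets _hdom hpre
  unfold Spec_check_invalid_nearby_tickets
  unfold check_invalid_nearby_tickets check_invalid_nearby_tickets_alt
  simp only []
  rcases hpre with hempty | ⟨h2, -⟩
  case inl =>
    -- every nearby ticket is empty: both loops just append each ticket to the valid list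
    rw [pv_fold_empty _ (fun st => by simp [get_invalid_ticket_values]) nearby_tickets hempty,
      pv_fold_empty _ (fun st => by simp) nearby_tickets hempty]
  have hticket : ∀ t, get_invalid_ticket_values (PySem.Dict.ofList ticket_rules) t
      = t.filter (fun v => !pvValid (pvMerge (PySem.List.sorted
          (pvIntervals ((PySem.Dict.ofList ticket_rules).values)) (fun iv => iv.1))) v) := by
    intro t
    unfold get_invalid_ticket_values
    have hfun : (fun (invalid_values : List Int) (value : Int) =>
        let value_does_not_match_rule :=
          (PySem.Dict.values (PySem.Dict.ofList ticket_rules)).foldl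
            (fun f intervalls => if value_matches_rule intervalls value then false else f) true
        if value_does_not_match_rule then invalid_values ++ [value] else invalid_values)
        = (fun (acc : List Int) (v : Int) =>
            if !pvValid (pvMerge (PySem.List.sorted
              (pvIntervals ((PySem.Dict.ofList ticket_rules).values)) (fun iv => iv.1))) v
            then acc ++ [v] else acc) := by
      funext acc v
      simp only []
      rw [pv_flag_foldl, Bool.true_and, pv_valid_eq_match _ v h2]
    rw [hfun, pv_foldl_filter]
    simp
  have hstep : (fun (st : List Int × List (List Int)) nearby_ticket =>
      let invalid_values_of_ticket := get_invalid_ticket_values (PySem.Dict.ofList ticket_rules) nearby_ticket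
      if invalid_values_of_ticket = [] then (st.1, st.2 ++ [nearby_ticket])
      else (st.1 ++ invalid_values_of_ticket, st.2))
      = (fun (st : List Int × List (List Int)) ticket =>
          let bad := ticket.filter (fun v => !pvValid (pvMerge (PySem.List.sorted
            (pvIntervals ((PySem.Dict.ofList ticket_rules).values)) (fun iv => iv.1))) v)
          if bad = [] then (st.1, st.2 ++ [ticket]) else (st.1 ++ bad, st.2)) := by
    funext st t
    simp only []
    rw [hticket t]
  rw [hstep]
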